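-- pv_equiv track=rewrite | github.com/Sergio-Carulli/Patrones | Code/infer_types.py | count_vertical_bar
-- ===== SOURCE A (Python) =====
-- def count_vertical_bar(line):
--     count = 0
--
--     # Iterate each character of the string. There are three cases:
--     #   - the char is ' '. This means there is a '|' ahead.
--     #   - the char is '|'.
--     #   - the char is another thing. This means the tree deep has been reached
--     for char in line:
--
--         if char == ' ':
--             continue
--
--         elif char == '|':
--             count += 1
--
--         else:
--             break
--
--     return count
-- ===== SOURCE B (Python) =====
-- def count_vertical_bar(line):
--     # Spaces are transparent to the scan, so delete them all up front;
--     # the answer is then the length of the leading '|' run, measured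
--     # as the length lost by stripping '|' from the left.
--     s = line.replace(' ', '')
--     return len(s) - len(s.lstrip('|'))
-- ===== Notes on version B (the rewrite author's own statement) =====
-- stated objective: alternative
-- what changed: Instead of A's single scan with continue/break and a counter, B first deletes every space from the whole string (spaces are transparent to the scan) and then returns the length of the leading pipe run, computed as the length lost by left-stripping pipes; a whole-string rewrite plus a strip-length difference replaces the interleaved counting loop.
import Mathlib
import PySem

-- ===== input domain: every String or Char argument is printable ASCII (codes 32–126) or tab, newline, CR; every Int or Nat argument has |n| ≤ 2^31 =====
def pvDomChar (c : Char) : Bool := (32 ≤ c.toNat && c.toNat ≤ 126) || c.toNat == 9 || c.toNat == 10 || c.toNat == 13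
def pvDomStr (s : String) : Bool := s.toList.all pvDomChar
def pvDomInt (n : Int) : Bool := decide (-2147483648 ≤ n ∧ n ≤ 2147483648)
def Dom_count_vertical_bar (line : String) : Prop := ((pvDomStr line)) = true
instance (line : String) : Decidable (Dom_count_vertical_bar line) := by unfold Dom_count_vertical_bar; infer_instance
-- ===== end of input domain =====

-- B deletes all spaces from the whole string, then returns the leading pipe-run length as a strip-length difference; objective: alternative decomposition, same cost.


-- ===== PORT A =====
-- literal port of A's for-loop with continue/break, as structural recursion over the chars with the count accumulator
def countVbLoop : List Char → Int → Int
  | [], count => count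
  | ch :: rest, count =>
    if ch = ' ' then countVbLoop rest count
    else if ch = '|' then countVbLoop rest (count + 1)
    else count

def count_vertical_bar (line : String) : Int :=
  countVbLoop line.toList 0

-- ===== PORT B =====
-- port of B: s = line.replace(' ', '') (= drop every space char), then len(s) - len(s.lstrip('|'))
def count_vertical_bar_alt (line : String) : Int :=
  let s := line.toList.filter (fun c => c ≠ ' ')
  (s.length : Int) - ((s.dropWhile (fun c => c == '|')).length : Int)

-- ===== PRECONDITION & SPEC =====
def Spec_count_vertical_bar (line : String) (out : Int) : Prop := out = count_vertical_bar_alt line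
instance (line : String) (out : Int) : Decidable (Spec_count_vertical_bar line out) := by unfold Spec_count_vertical_bar; infer_instance

-- ===== CLAIM =====
def Claim_equal_count_vertical_bar : Prop := ∀ (line : String), Dom_count_vertical_bar line → Spec_count_vertical_bar line (count_vertical_bar line)

-- ===== LEMMAS AND PROOFS =====
-- A's loop result is the leading '|'-run length of the space-filtered list, shifted by the accumulator
theorem countVbLoop_eq (l : List Char) (c : Int) :
    countVbLoop l c =
      c + (((l.filter (fun ch => ch ≠ ' ')).takeWhile (fun ch => ch == '|')).length : Int) := by
  induction l generalizing c with
  | nil => simp [countVbLoop]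
  | cons ch rest ih =>
    by_cases hs : ch = ' '
    · subst hs
      simpa [countVbLoop] using ih c
    · by_cases hp : ch = '|'
      · subst hp
        simp [countVbLoop, hs, List.filter, List.takeWhile, ih]
        ring
      · simp [countVbLoop, hs, hp, List.filter]

-- length s - length (dropWhile p s) = length (takeWhile p s)
theorem len_sub_dropWhile (p : Char → Bool) (s : List Char) :
    (s.length : Int) - ((s.dropWhile p).length : Int) = ((s.takeWhile p).length : Int) := by
  have h := List.takeWhile_append_dropWhile (p := p) (l := s)
  have hl : (s.takeWhile p).length + (s.dropWhile p).length = s.length := by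
    calc (s.takeWhile p).length + (s.dropWhile p).length
        = (s.takeWhile p ++ s.dropWhile p).length := (List.length_append).symm
      _ = s.length := by rw [h]
  omega

-- ===== VERDICT =====
theorem count_vertical_bar_spec : Claim_equal_count_vertical_bar := by
  intro line _
  unfold Spec_count_vertical_bar count_vertical_bar count_vertical_bar_alt
  rw [countVbLoop_eq, len_sub_dropWhile]
  simp
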